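-- pv_equiv track=rewrite | github.com/leeroybrun/edison | src/edison/cli/evidence/capture.py | _split_only
-- ===== SOURCE A (Python) =====
-- from typing import Any, Iterable
--
-- def _split_only(values: Iterable[str]) -> list[str]:
--     out: list[str] = []
--     for raw in values:
--         for part in str(raw).split(","):
--             s = part.strip()
--             if s:
--                 out.append(s)
--     return out
-- ===== SOURCE B (Python) =====
-- def _split_only(values):
--     out = []
--     for raw in values:
--         buf = []
--         for ch in str(raw) + ",":
--             if ch == ",":
--                 while buf and buf[0].isspace():
--                     buf.pop(0)
--                 while buf and buf[-1].isspace():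
--                     buf.pop()
--                 if buf:
--                     out.append("".join(buf))
--                 buf = []
--             else:
--                 buf.append(ch)
--     return out
-- ===== Notes on version B (the rewrite author's own statement) =====
-- stated objective: alternative
-- what changed: Replaces A's per-value split()/strip() library pipeline with a hand-written character-level state machine: scan each value's characters with a sentinel trailing comma, accumulate a buffer, and on each comma trim the buffer with explicit pop loops and flush it; no split, strip or per-part strings are ever built.
import Mathlib
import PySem

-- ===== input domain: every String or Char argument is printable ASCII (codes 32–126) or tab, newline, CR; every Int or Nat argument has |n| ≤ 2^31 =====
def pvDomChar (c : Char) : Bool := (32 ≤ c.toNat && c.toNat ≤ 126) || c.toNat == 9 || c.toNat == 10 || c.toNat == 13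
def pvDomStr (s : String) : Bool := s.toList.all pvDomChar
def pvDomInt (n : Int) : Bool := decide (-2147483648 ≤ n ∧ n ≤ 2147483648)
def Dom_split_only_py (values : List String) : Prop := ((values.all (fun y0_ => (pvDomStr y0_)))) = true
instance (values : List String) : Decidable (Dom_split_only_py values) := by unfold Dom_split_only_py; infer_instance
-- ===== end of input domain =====

-- B replaces A's per-value split()/strip() pipeline with a hand-written character-level state
-- machine: scan each value's characters with a sentinel trailing comma, buffering characters and
-- on each comma trimming the buffer with explicit pop loops and flushing it (objective: alternative).

-- ===== PORT A =====
-- literal transliteration of A: outer loop over values, inner loop over raw.split(","),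
-- appending each non-empty stripped part (str(raw) is the identity: raw is already a str)
def split_only_py (values : List String) : List String :=
  values.foldl (fun out raw =>
    (PySem.Chars.splitOn raw.toList [',']).foldl (fun out part =>
      let s := PySem.Chars.strip part
      if s ≠ [] then out ++ [String.ofList s] else out) out) []

-- ===== PORT B =====
-- the comma branch of Source B's scanner: the two while-pop loops (pop(0) while the head is a space =
-- dropWhile; pop() while the last is a space = reverse-dropWhile-reverse; ch.isspace() is
-- PySem.Chars.isspace), then append the joined buffer if non-empty
def pvFlush (out : List String) (buf : List Char) : List String :=
  let t := ((buf.dropWhile PySem.Chars.isspace).reverse.dropWhile PySem.Chars.isspace).reverse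
  if t ≠ [] then out ++ [String.ofList t] else out

-- one step of Source B's inner character loop: flush on a comma, otherwise buffer the character
def pvStep (st : List String × List Char) (ch : Char) : List String × List Char :=
  if ch = ',' then (pvFlush st.1 st.2, []) else (st.1, st.2 ++ [ch])

-- literal transliteration of Source B: for each raw, scan str(raw) + "," character by character
def split_only_py_alt (values : List String) : List String :=
  values.foldl (fun out raw => ((raw.toList ++ [',']).foldl pvStep (out, [])).1) []

-- ===== PRECONDITION & SPEC =====
def Spec_split_only_py (values : List String) (out : List String) : Prop := out = split_only_py_alt values
instance (values : List String) (out : List String) : Decidable (Spec_split_only_py values out) := by unfold Spec_split_only_py; infer_instance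

-- ===== CLAIM (what is proved, stated in full; the proofs are below) =====
def Claim_equal_split_only_py : Prop := ∀ (values : List String), Dom_split_only_py values → Spec_split_only_py values (split_only_py values)

-- ===== LEMMAS AND PROOFS =====

-- what one segment contributes to the output, shared by both characterisations
def emit (segs : List (List Char)) : List String :=
  (segs.filter (fun part => decide (PySem.Chars.strip part ≠ []))).map
    (fun part => String.ofList (PySem.Chars.strip part))

theorem pvFlush_eq (out : List String) (buf : List Char) :
    pvFlush out buf = out ++ emit [buf] := by
  have ht : ((buf.dropWhile PySem.Chars.isspace).reverse.dropWhile PySem.Chars.isspace).reverse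
      = PySem.Chars.strip buf := rfl
  unfold pvFlush emit
  rw [ht]
  by_cases h : PySem.Chars.strip buf = [] <;> simp [h]

-- structural model of Python's s.split(c) for a one-character separator
def sp (c : Char) : List Char → List (List Char)
  | [] => [[]]
  | x :: rest => if x = c then [] :: sp c rest
                 else (x :: (sp c rest).headI) :: (sp c rest).tail

theorem sp_ne_nil (c : Char) (l : List Char) : sp c l ≠ [] := by
  cases l with
  | nil => simp [sp]
  | cons x rest => simp only [sp]; split <;> simp

theorem go_sp (c : Char) : ∀ (fuel : Nat) (l cur : List Char) (acc : List (List Char)),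
    l.length < fuel →
    PySem.Chars.splitOn.go [c] fuel l cur acc
      = acc.reverse ++ ((cur.reverse ++ (sp c l).headI) :: (sp c l).tail) := by
  intro fuel
  induction fuel with
  | zero => intro l cur acc h; omega
  | succ f ih =>
    intro l cur acc h
    cases l with
    | nil => simp [PySem.Chars.splitOn.go, sp]
    | cons x rest =>
      rw [PySem.Chars.splitOn.go]
      by_cases hx : x = c
      · subst hx
        have hp : List.isPrefixOf [x] (x :: rest) = true := by
          simp [List.isPrefixOf]
        rw [if_pos hp]
        simp only [List.length, List.drop_succ_cons, List.drop_zero]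
        rw [ih rest [] (cur.reverse :: acc) (by simp at h; omega)]
        have hne := sp_ne_nil x rest
        cases hsp : sp x rest with
        | nil => exact absurd hsp hne
        | cons h0 t0 => simp [sp, hsp]
      · have hp : List.isPrefixOf [c] (x :: rest) = false := by
          simp [List.isPrefixOf]; intro hx2; exact absurd hx2.symm hx
        rw [if_neg (by simp [hp])]
        rw [ih rest (x :: cur) acc (by simp at h ⊢; omega)]
        simp [sp, if_neg hx]

theorem splitOn_eq_sp (c : Char) (l : List Char) : PySem.Chars.splitOn l [c] = sp c l := by
  unfold PySem.Chars.splitOn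
  rw [go_sp c (l.length + 1) l [] [] (by omega)]
  have hne := sp_ne_nil c l
  cases hsp : sp c l with
  | nil => exact absurd hsp hne
  | cons h0 t0 => simp

-- A's inner loop is map-of-filter (via PySem.List.foldl_append_if)
theorem inner_loop_eq (L : List (List Char)) (out : List String) :
    L.foldl (fun out part =>
        let s := PySem.Chars.strip part
        if s ≠ [] then out ++ [String.ofList s] else out) out
      = out ++ emit L := by
  have h := PySem.List.foldl_append_if (fun part => decide (PySem.Chars.strip part ≠ []))
    (fun part => String.ofList (PySem.Chars.strip part)) L out
  simpa [emit] using h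

-- A computes emit over the concatenation of the per-value splits
theorem split_only_py_eq (values : List String) :
    split_only_py values = values.flatMap (fun raw => emit (sp ',' raw.toList)) := by
  unfold split_only_py
  have hF : (fun (out : List String) (raw : String) =>
      (PySem.Chars.splitOn raw.toList [',']).foldl (fun out part =>
        let s := PySem.Chars.strip part
        if s ≠ [] then out ++ [String.ofList s] else out) out)
    = fun out raw => out ++ emit (sp ',' raw.toList) := by
    funext out raw
    rw [inner_loop_eq, splitOn_eq_sp]
  rw [hF, PySem.List.foldl_append_eq_flatMap]
  simp

theorem emit_cons (s : List Char) (rest : List (List Char)) :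
    emit (s :: rest) = emit [s] ++ emit rest := by
  unfold emit
  by_cases h : PySem.Chars.strip s = [] <;> simp [h]

-- B's scanner over l plus the sentinel comma flushes exactly the segments of sp ',' l
theorem scan_eq (c : Char) (hc : c = ',') : ∀ (l : List Char) (out : List String) (buf : List Char),
    ((l ++ [c]).foldl pvStep (out, buf))
      = (out ++ emit ((buf ++ (sp c l).headI) :: (sp c l).tail), []) := by
  subst hc
  intro l
  induction l with
  | nil =>
    intro out buf
    simp [pvStep, sp, pvFlush_eq]
  | cons x rest ih =>
    intro out buf
    by_cases hx : x = ','
    · subst hx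
      have hne := sp_ne_nil ',' rest
      cases hsp : sp ',' rest with
      | nil => exact absurd hsp hne
      | cons h0 t0 =>
        simp only [List.cons_append, List.foldl_cons, pvStep]
        rw [if_pos trivial, ih, sp, if_pos rfl, hsp, pvFlush_eq]
        simp only [List.headI, List.tail, List.nil_append, List.append_nil]
        rw [List.append_assoc, ← emit_cons buf (h0 :: t0)]
    · simp only [List.cons_append, List.foldl_cons, pvStep, if_neg hx]
      rw [ih]
      simp [sp, if_neg hx]

-- B computes the same flatMap of emit
theorem split_only_py_alt_eq (values : List String) :
    split_only_py_alt values = values.flatMap (fun raw => emit (sp ',' raw.toList)) := by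
  unfold split_only_py_alt
  have hF : (fun (out : List String) (raw : String) =>
      ((raw.toList ++ [',']).foldl pvStep (out, [])).1)
    = fun out raw => out ++ emit (sp ',' raw.toList) := by
    funext out raw
    rw [scan_eq ',' rfl]
    have hne := sp_ne_nil ',' raw.toList
    cases hsp : sp ',' raw.toList with
    | nil => exact absurd hsp hne
    | cons h0 t0 => simp
  rw [hF, PySem.List.foldl_append_eq_flatMap]
  simp

-- ===== VERDICT (by name: the statement is the Claim_ definition above) =====
theorem split_only_py_spec : Claim_equal_split_only_py := by
  intro values _
  unfold Spec_split_only_py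
  rw [split_only_py_eq, split_only_py_alt_eq]
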